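-- pv_equiv track=rewrite | github.com/aitjcize/bb8 | bb8/backend/content_modules/twrealprice.py | GenNearbyIndex
-- ===== SOURCE A (Python) =====
-- def GenNearbyIndex(lat_center, lng_center, N):
--     """Generate the nearby index of the given lat/lng index.
--
--     Returns:
--       lat_in, lng_in for the following sequence:
--
--       3333333
--       3222223
--       3211123
--       3210123
--       3211123
--       3222223
--       3333333
--     """
--     n = 0
--     yield (lat_center, lng_center)
--
--     while n < N:
--         n += 1
--         for i in range(n * 2):                        # From left-top:
--             yield lat_center - n + i, lng_center - n  # left --> right
--         for i in range(n * 2):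
--             yield lat_center + n, lng_center - n + i  # top --> bottom
--         for i in range(n * 2):
--             yield lat_center + n - i, lng_center + n  # right --> left
--         for i in range(n * 2):
--             yield lat_center - n, lng_center + n - i  # bottom --> top
-- ===== SOURCE B (Python) =====
-- def GenNearbyIndex(lat_center, lng_center, N):
--     """Enumerate the whole (2M+1) x (2M+1) square of offsets at once and
--     sort it by a closed-form spiral index (ring, then position along the
--     perimeter walk), instead of walking ring by ring."""
--     def spiral_index(p):
--         dx, dy = p[0] - lat_center, p[1] - lng_center
--         r = max(abs(dx), abs(dy))
--         if r == 0:
--             return 0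
--         if dy == -r and dx < r:
--             pos = r + dx            # left -> right along the top edge
--         elif dx == r:
--             pos = 3 * r + dy        # top -> bottom along the right edge
--         elif dy == r:
--             pos = 5 * r - dx        # right -> left along the bottom edge
--         else:
--             pos = 7 * r - dy        # bottom -> top along the left edge
--         return (2 * r - 1) ** 2 + pos
--
--     M = max(N, 0)
--     square = [(lat_center + dx, lng_center + dy)
--               for dx in range(-M, M + 1) for dy in range(-M, M + 1)]
--     yield from sorted(square, key=spiral_index)
-- ===== Notes on version B (the rewrite author's own statement) =====
-- stated objective: alternative
-- what changed: Instead of walking the rings edge by edge, B enumerates the whole (2N+1)x(2N+1) square of coordinates at once and sorts it by a closed-form spiral-index key (ring = Chebyshev distance, plus perimeter offset).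
import Mathlib
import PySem

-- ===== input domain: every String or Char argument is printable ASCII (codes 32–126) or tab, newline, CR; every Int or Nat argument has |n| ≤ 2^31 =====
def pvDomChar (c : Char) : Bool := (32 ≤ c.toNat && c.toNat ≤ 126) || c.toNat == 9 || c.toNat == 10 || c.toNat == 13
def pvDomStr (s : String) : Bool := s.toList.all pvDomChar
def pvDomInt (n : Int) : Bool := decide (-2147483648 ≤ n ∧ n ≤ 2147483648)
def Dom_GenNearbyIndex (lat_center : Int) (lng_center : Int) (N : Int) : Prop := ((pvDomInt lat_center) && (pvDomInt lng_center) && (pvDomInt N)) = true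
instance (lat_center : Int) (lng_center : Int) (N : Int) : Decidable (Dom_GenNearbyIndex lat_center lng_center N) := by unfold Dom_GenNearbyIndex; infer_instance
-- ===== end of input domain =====

-- B enumerates the whole square of offsets at once and sorts it by a closed-form
-- spiral index instead of walking the rings (objective: alternative algorithm).

-- ===== PORT A =====
def aRing (lat_center lng_center n : Int) : List (Int × Int) :=
  (PySem.List.pyRange 0 (n * 2) 1).map (fun i => (lat_center - n + i, lng_center - n)) ++
  (PySem.List.pyRange 0 (n * 2) 1).map (fun i => (lat_center + n, lng_center - n + i)) ++
  (PySem.List.pyRange 0 (n * 2) 1).map (fun i => (lat_center + n - i, lng_center + n)) ++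
  (PySem.List.pyRange 0 (n * 2) 1).map (fun i => (lat_center - n, lng_center + n - i))

def aWhile (lat_center lng_center N n : Int) : List (Int × Int) :=
  if _h : n < N then
    aRing lat_center lng_center (n + 1) ++ aWhile lat_center lng_center N (n + 1)
  else []
termination_by (N - n).toNat
decreasing_by omega

def GenNearbyIndex (lat_center : Int) (lng_center : Int) (N : Int) : List (Int × Int) :=
  (lat_center, lng_center) :: aWhile lat_center lng_center N 0

-- ===== PORT B =====
-- closed-form position of a point in the spiral order: ring r = max(|dx|,|dy|),
-- (2r-1)^2 points strictly inside, plus the offset along the perimeter walk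
def spiralIndex (lat_center lng_center : Int) (p : Int × Int) : Int :=
  let dx := p.1 - lat_center
  let dy := p.2 - lng_center
  let r := max |dx| |dy|
  if r = 0 then 0
  else
    let pos :=
      if dy = -r ∧ dx < r then r + dx
      else if dx = r then 3 * r + dy
      else if dy = r then 5 * r - dx
      else 7 * r - dy
    (2 * r - 1) ^ 2 + pos

def GenNearbyIndex_alt (lat_center : Int) (lng_center : Int) (N : Int) : List (Int × Int) :=
  let M := max N 0
  let square := (PySem.List.pyRange (-M) (M + 1) 1).flatMap
    (fun dx => (PySem.List.pyRange (-M) (M + 1) 1).map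
      (fun dy => (lat_center + dx, lng_center + dy)))
  PySem.List.sorted square (spiralIndex lat_center lng_center) false

-- ===== PRECONDITION & SPEC =====
def Spec_GenNearbyIndex (lat_center : Int) (lng_center : Int) (N : Int) (out : List (Int × Int)) : Prop := out = GenNearbyIndex_alt lat_center lng_center N
instance (lat_center : Int) (lng_center : Int) (N : Int) (out : List (Int × Int)) : Decidable (Spec_GenNearbyIndex lat_center lng_center N out) := by unfold Spec_GenNearbyIndex; infer_instance

-- ===== CLAIM (what is proved, stated in full; the proofs are below) =====
def Claim_equal_GenNearbyIndex : Prop := ∀ (lat_center : Int) (lng_center : Int) (N : Int), Dom_GenNearbyIndex lat_center lng_center N → Spec_GenNearbyIndex lat_center lng_center N (GenNearbyIndex lat_center lng_center N)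

-- ===== LEMMAS AND PROOFS =====

-- spiralIndex evaluated on each of A's four edges
theorem key_edge1 (lat lng n i : Int) (hn : 1 ≤ n) (h0 : 0 ≤ i) (h2 : i < 2 * n) :
    spiralIndex lat lng (lat - n + i, lng - n) = (2 * n - 1) ^ 2 + i := by
  have hx : lat - n + i - lat = i - n := by ring
  have hy : lng - n - lng = -n := by ring
  have ha : |i - n| ≤ n := abs_le.mpr ⟨by omega, by omega⟩
  have hb : |(-n : Int)| = n := by rw [abs_neg, abs_of_nonneg (by omega)]
  simp only [spiralIndex, hx, hy, hb]
  have hr : max |i - n| n = n := by omega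
  rw [hr, if_neg (by omega), if_pos ⟨rfl, by omega⟩]
  ring

theorem key_edge2 (lat lng n i : Int) (hn : 1 ≤ n) (h0 : 0 ≤ i) (h2 : i < 2 * n) :
    spiralIndex lat lng (lat + n, lng - n + i) = (2 * n - 1) ^ 2 + (2 * n + i) := by
  have hx : lat + n - lat = n := by ring
  have hy : lng - n + i - lng = i - n := by ring
  have ha : |i - n| ≤ n := abs_le.mpr ⟨by omega, by omega⟩
  have hb : |(n : Int)| = n := abs_of_nonneg (by omega)
  simp only [spiralIndex, hx, hy, hb]
  have hr : max n |i - n| = n := by omega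
  rw [hr, if_neg (by omega), if_neg (by omega), if_pos rfl]
  ring

theorem key_edge3 (lat lng n i : Int) (hn : 1 ≤ n) (h0 : 0 ≤ i) (h2 : i < 2 * n) :
    spiralIndex lat lng (lat + n - i, lng + n) = (2 * n - 1) ^ 2 + (4 * n + i) := by
  have hx : lat + n - i - lat = n - i := by ring
  have hy : lng + n - lng = n := by ring
  have ha : |n - i| ≤ n := abs_le.mpr ⟨by omega, by omega⟩
  have hb : |(n : Int)| = n := abs_of_nonneg (by omega)
  simp only [spiralIndex, hx, hy, hb]
  have hr : max |n - i| n = n := by omega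
  rw [hr, if_neg (by omega), if_neg (by omega)]
  by_cases hi : i = 0
  · subst hi
    rw [if_pos (by omega)]
    ring
  · rw [if_neg (by omega), if_pos rfl]
    ring

theorem key_edge4 (lat lng n i : Int) (hn : 1 ≤ n) (h0 : 0 ≤ i) (h2 : i < 2 * n) :
    spiralIndex lat lng (lat - n, lng + n - i) = (2 * n - 1) ^ 2 + (6 * n + i) := by
  have hx : lat - n - lat = -n := by ring
  have hy : lng + n - i - lng = n - i := by ring
  have ha : |n - i| ≤ n := abs_le.mpr ⟨by omega, by omega⟩
  have hb : |(-n : Int)| = n := by rw [abs_neg, abs_of_nonneg (by omega)]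
  simp only [spiralIndex, hx, hy, hb]
  have hr : max n |n - i| = n := by omega
  rw [hr, if_neg (by omega), if_neg (by omega), if_neg (by omega)]
  by_cases hi : i = 0
  · subst hi
    rw [if_pos (by omega)]
    ring
  · rw [if_neg (by omega)]
    ring

-- the keys of ring n are exactly the contiguous block [(2n-1)^2, (2n+1)^2)
theorem ringKey (lat lng n : Int) (hn : 1 ≤ n) :
    (aRing lat lng n).map (spiralIndex lat lng) =
      PySem.List.pyRange ((2 * n - 1) ^ 2) ((2 * n + 1) ^ 2) 1 := by
  have h8 : ((2 * n + 1) ^ 2 - (2 * n - 1) ^ 2) = 8 * n := by ring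
  have htn : ((2 * n + 1) ^ 2 - (2 * n - 1) ^ 2).toNat =
      (2 * n).toNat + ((2 * n).toNat + ((2 * n).toNat + (2 * n).toNat)) := by omega
  have hlen : (n * 2 - 0).toNat = (2 * n).toNat := by omega
  rw [aRing, PySem.List.pyRange_one ((2 * n - 1) ^ 2), htn,
    List.range_add, List.range_add, List.range_add]
  simp only [List.map_append, List.map_map, PySem.List.pyRange_one 0 (n * 2), hlen,
    List.append_assoc]
  have hcast : ∀ k : Nat, k < (2 * n).toNat → (0 : Int) ≤ (k : Int) ∧ (k : Int) < 2 * n := by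
    intro k hk; constructor <;> omega
  congr 1
  · apply List.map_congr_left; intro k hk
    obtain ⟨h0, h2⟩ := hcast k (List.mem_range.mp hk)
    simp only [Function.comp]
    rw [show (0 : Int) + (k : Int) = (k : Int) by ring, key_edge1 lat lng n k hn h0 h2]
  congr 1
  · apply List.map_congr_left; intro k hk
    obtain ⟨h0, h2⟩ := hcast k (List.mem_range.mp hk)
    simp only [Function.comp]
    rw [show (0 : Int) + ((k : Int)) = (k : Int) by ring, key_edge2 lat lng n k hn h0 h2]
    push_cast [Int.toNat_of_nonneg (show (0 : Int) ≤ 2 * n by omega)]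
    ring
  congr 1
  · apply List.map_congr_left; intro k hk
    obtain ⟨h0, h2⟩ := hcast k (List.mem_range.mp hk)
    simp only [Function.comp]
    rw [show (0 : Int) + ((k : Int)) = (k : Int) by ring, key_edge3 lat lng n k hn h0 h2]
    push_cast [Int.toNat_of_nonneg (show (0 : Int) ≤ 2 * n by omega)]
    ring
  · apply List.map_congr_left; intro k hk
    obtain ⟨h0, h2⟩ := hcast k (List.mem_range.mp hk)
    simp only [Function.comp]
    rw [show (0 : Int) + ((k : Int)) = (k : Int) by ring, key_edge4 lat lng n k hn h0 h2]
    push_cast [Int.toNat_of_nonneg (show (0 : Int) ≤ 2 * n by omega)]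
    ring

theorem aWhile_eq (lat_center lng_center N : Int) : ∀ (k : Nat) (n : Int), 0 ≤ n →
    (N - n).toNat ≤ k →
    aWhile lat_center lng_center N n =
      (PySem.List.pyRange (n + 1) (N + 1) 1).flatMap (aRing lat_center lng_center) := by
  intro k
  induction k with
  | zero =>
    intro n _ hk
    have h : ¬ n < N := by omega
    rw [aWhile, dif_neg h, PySem.List.pyRange_one_eq_nil (by omega), List.flatMap_nil]
  | succ k ih =>
    intro n hn hk
    by_cases h : n < N
    · rw [aWhile, dif_pos h, PySem.List.pyRange_one_cons (show n + 1 < N + 1 by omega),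
        List.flatMap_cons, ih (n + 1) (by omega) (by omega)]
    · rw [aWhile, dif_neg h, PySem.List.pyRange_one_eq_nil (by omega), List.flatMap_nil]

theorem flatKeys (lat lng : Int) : ∀ (t : Nat),
    ((PySem.List.pyRange 1 ((t : Int) + 1) 1).flatMap (aRing lat lng)).map (spiralIndex lat lng) =
      PySem.List.pyRange 1 ((2 * (t : Int) + 1) ^ 2) 1 := by
  intro t
  induction t with
  | zero =>
    rw [PySem.List.pyRange_one_eq_nil (by omega), List.flatMap_nil, List.map_nil,
      PySem.List.pyRange_one_eq_nil (by norm_num)]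
  | succ t ih =>
    have hc : ((t + 1 : Nat) : Int) + 1 = ((t : Int) + 1) + 1 := by push_cast; ring
    have hsq : (1 : Int) ≤ (2 * (t : Int) + 1) ^ 2 := by nlinarith [sq_nonneg ((t : Int))]
    have hsq2 : (2 * (t : Int) + 1) ^ 2 ≤ (2 * ((t : Int) + 1) - 1) ^ 2 := by nlinarith
    rw [hc, PySem.List.pyRange_one_succ_right (by omega), List.flatMap_append, List.map_append,
      ih, List.flatMap_cons, List.flatMap_nil, List.append_nil,
      ringKey lat lng ((t : Int) + 1) (by omega),
      show (2 * ((t : Int) + 1) - 1) ^ 2 = (2 * (t : Int) + 1) ^ 2 by ring,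
      ← PySem.List.pyRange_one_append 1 ((2 * (t : Int) + 1) ^ 2) _ hsq (by nlinarith)]
    congr 1

-- the keys of A's whole output are exactly 0, 1, ..., (2*max(N,0)+1)^2 - 1 in order
theorem mapKey (lat lng N : Int) :
    (GenNearbyIndex lat lng N).map (spiralIndex lat lng) =
      PySem.List.pyRange 0 ((2 * max N 0 + 1) ^ 2) 1 := by
  have hkey0 : spiralIndex lat lng (lat, lng) = 0 := by
    simp [spiralIndex]
  rw [GenNearbyIndex, aWhile_eq lat lng N N.toNat 0 le_rfl (by omega), List.map_cons, hkey0]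
  by_cases hN : 0 ≤ N
  · have : N = ((N.toNat : Int)) := by omega
    rw [show (0 : Int) + 1 = 1 by ring, this, flatKeys lat lng N.toNat]
    have hsq : (0 : Int) < (2 * ((N.toNat : Int)) + 1) ^ 2 := by positivity
    rw [show max ((N.toNat : Int)) 0 = ((N.toNat : Int)) by omega,
      PySem.List.pyRange_one_cons hsq]
    norm_num
  · rw [PySem.List.pyRange_one_eq_nil (by omega), List.flatMap_nil, List.map_nil,
      show max N 0 = 0 by omega]
    norm_num [PySem.List.pyRange_one_cons (show (0:Int) < 1 by norm_num),
      PySem.List.pyRange_one_eq_nil (le_refl (1:Int))]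

theorem pairwiseKey (lat lng N : Int) :
    (GenNearbyIndex lat lng N).Pairwise
      (fun a b => spiralIndex lat lng a < spiralIndex lat lng b) := by
  rw [← List.pairwise_map]
  rw [mapKey lat lng N]
  exact PySem.List.pairwise_lt_pyRange_one _ _

theorem nodupA (lat lng N : Int) : (GenNearbyIndex lat lng N).Nodup :=
  (pairwiseKey lat lng N).imp (fun h heq => by subst heq; exact lt_irrefl _ h)

theorem lengthA (lat lng N : Int) :
    (GenNearbyIndex lat lng N).length = ((2 * max N 0 + 1) ^ 2).toNat := by
  rw [← List.length_map (f := spiralIndex lat lng), mapKey lat lng N,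
    PySem.List.length_pyRange_one]
  omega

theorem subsetA (lat lng N : Int) :
    GenNearbyIndex lat lng N ⊆
      (PySem.List.pyRange (-(max N 0)) ((max N 0) + 1) 1).flatMap
        (fun dx => (PySem.List.pyRange (-(max N 0)) ((max N 0) + 1) 1).map
          (fun dy => (lat + dx, lng + dy))) := by
  intro p hp
  simp only [List.mem_flatMap, List.mem_map, PySem.List.mem_pyRange_one]
  rw [GenNearbyIndex, aWhile_eq lat lng N N.toNat 0 le_rfl (by omega)] at hp
  simp only [List.mem_cons, List.mem_flatMap, PySem.List.mem_pyRange_one] at hp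
  rcases hp with rfl | ⟨n, ⟨hn1, hn2⟩, hp⟩
  · exact ⟨0, ⟨by omega, by omega⟩, 0, ⟨by omega, by omega⟩, by simp⟩
  · have hnN : n ≤ N := by omega
    simp only [aRing, List.mem_append, List.mem_map, PySem.List.mem_pyRange_one] at hp
    rcases hp with ((⟨i, ⟨h0, h2⟩, rfl⟩ | ⟨i, ⟨h0, h2⟩, rfl⟩) | ⟨i, ⟨h0, h2⟩, rfl⟩) | ⟨i, ⟨h0, h2⟩, rfl⟩
    · exact ⟨-n + i, ⟨by omega, by omega⟩, -n, ⟨by omega, by omega⟩,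
        by rw [Prod.mk.injEq]; exact ⟨by ring, by ring⟩⟩
    · exact ⟨n, ⟨by omega, by omega⟩, -n + i, ⟨by omega, by omega⟩,
        by rw [Prod.mk.injEq]; exact ⟨by ring, by ring⟩⟩
    · exact ⟨n - i, ⟨by omega, by omega⟩, n, ⟨by omega, by omega⟩,
        by rw [Prod.mk.injEq]; exact ⟨by ring, by ring⟩⟩
    · exact ⟨-n, ⟨by omega, by omega⟩, n - i, ⟨by omega, by omega⟩,
        by rw [Prod.mk.injEq]; exact ⟨by ring, by ring⟩⟩

theorem lengthSquare (lat lng M : Int) (hM : 0 ≤ M) :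
    ((PySem.List.pyRange (-M) (M + 1) 1).flatMap
      (fun dx => (PySem.List.pyRange (-M) (M + 1) 1).map
        (fun dy => (lat + dx, lng + dy)))).length = ((2 * M + 1) ^ 2).toNat := by
  rw [List.length_flatMap]
  simp only [List.length_map, PySem.List.length_pyRange_one]
  rw [List.map_const', List.sum_replicate, PySem.List.length_pyRange_one, smul_eq_mul]
  have h1 : (M + 1 - -M).toNat = (2 * M + 1).toNat := by omega
  rw [h1, ← Int.toNat_mul (by omega) (by omega)]
  congr 1
  ring

-- ===== VERDICT (by name: the statement is the Claim_ definition above) =====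
theorem GenNearbyIndex_spec : Claim_equal_GenNearbyIndex := by
  intro lat lng N _
  unfold Spec_GenNearbyIndex GenNearbyIndex_alt
  refine (PySem.List.sorted_eq_of_perm_of_pairwise_lt _ _ _ ?_ (pairwiseKey lat lng N)).symm
  refine ((nodupA lat lng N).subperm (subsetA lat lng N)).perm_of_length_le ?_
  rw [lengthA lat lng N, lengthSquare lat lng (max N 0) (by omega)]
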